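-- pv_equiv track=rewrite | github.com/Nauhai/aoc-2023 | day-12/src/util.py | combi_to_springs
-- ===== SOURCE A (Python) =====
-- def combi_to_springs(combi, groups, length):
--     springs = []
--     for i in range(len(combi)):
--         for j in range(combi[i]-(0 if i == 0 else combi[i-1])):
--             springs.append(".")
--         for j in range(groups[i]):
--             springs.append("#")
--     for i in range(length-len(springs)):
--         springs.append(".")
--     return springs
-- ===== SOURCE B (Python) =====
-- def combi_to_springs(combi, groups, length):
--     # pass 1: compute each hash run's start index and width from running prefix positions
--     runs = []
--     pos = 0
--     prev = 0
--     for c, g in zip(combi, groups):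
--         pos += max(c - prev, 0)
--         h = max(g, 0)
--         runs.append((pos, h))
--         pos += h
--         prev = c
--     # pass 2: preallocate a flat dot array of the final size, overwrite the hash runs in place
--     out = ["."] * max(pos, length)
--     for s, h in runs:
--         out[s:s+h] = ["#"] * h
--     return out
-- ===== Notes on version B (the rewrite author's own statement) =====
-- stated objective: alternative
-- what changed: Instead of appending dots and hashes interleaved per index, B first computes each hash run's (start, width) via running prefix positions, then preallocates a flat dot array of the final size max(pos, length) and overwrites the hash runs in place by slice assignment.
import Mathlib
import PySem

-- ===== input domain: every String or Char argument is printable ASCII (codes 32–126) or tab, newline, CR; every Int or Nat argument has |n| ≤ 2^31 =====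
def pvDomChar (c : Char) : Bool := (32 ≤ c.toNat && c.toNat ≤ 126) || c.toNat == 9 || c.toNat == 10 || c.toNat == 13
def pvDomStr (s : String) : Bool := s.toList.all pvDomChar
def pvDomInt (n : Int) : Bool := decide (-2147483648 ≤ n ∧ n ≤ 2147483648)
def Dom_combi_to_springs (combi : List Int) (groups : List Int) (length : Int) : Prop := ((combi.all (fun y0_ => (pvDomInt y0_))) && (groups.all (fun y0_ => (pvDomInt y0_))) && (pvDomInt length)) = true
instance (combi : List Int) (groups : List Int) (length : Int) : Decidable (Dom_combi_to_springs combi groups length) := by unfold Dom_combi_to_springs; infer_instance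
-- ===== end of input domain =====

-- B precomputes each hash run's (start, width) by a prefix-position pass, then preallocates a
-- flat dot array of the final size and overwrites the runs in place; objective: alternative.


-- ===== PORT A =====
-- 'for j in range(k): springs.append(x)' — the inner append loops of A
def pvAppendLoop (k : Int) (x : String) (s : List String) : List String :=
  (PySem.List.pyRange 0 k 1).foldl (fun acc _ => acc ++ [x]) s

def combi_to_springs (combi : List Int) (groups : List Int) (length : Int) : List String :=
  let springs := (PySem.List.pyRange 0 (combi.length : Int) 1).foldl
    (fun springs i =>
      let springs := pvAppendLoop
        (PySem.List.pyGetD combi i 0 -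
          (if i == 0 then 0 else PySem.List.pyGetD combi (i - 1) 0)) "." springs
      pvAppendLoop (PySem.List.pyGetD groups i 0) "#" springs) []
  pvAppendLoop (length - (springs.length : Int)) "." springs

-- ===== PORT B =====
-- one step of Source B's pass-1 loop: state (runs, pos, prev), input (c, g)
def pvPass1 (st : List (Int × Int) × Int × Int) (cg : Int × Int) : List (Int × Int) × Int × Int :=
  let pos := st.2.1 + max (cg.1 - st.2.2) 0
  let h := max cg.2 0
  (st.1 ++ [(pos, h)], pos + h, cg.1)

-- out[s:s+h] = ["#"] * h — exact: s and h are ≥ 0 by construction, and Python slice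
-- assignment with 0 ≤ s ≤ s+h is out[:s] + ["#"]*h + out[s+h:] (clamped like take/drop)
def pvMark (out : List String) (r : Int × Int) : List String :=
  out.take r.1.toNat ++ List.replicate r.2.toNat "#" ++ out.drop (r.1.toNat + r.2.toNat)

def combi_to_springs_alt (combi : List Int) (groups : List Int) (length : Int) : List String :=
  let st := (combi.zip groups).foldl pvPass1 ([], 0, 0)
  let out := List.replicate (max st.2.1 length).toNat "."
  st.1.foldl pvMark out

-- ===== PRECONDITION & SPEC =====
-- A raises IndexError on groups[i] when len(groups) < len(combi); those inputs are excluded.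
def Pre_combi_to_springs (combi : List Int) (groups : List Int) (length : Int) : Prop :=
  combi.length ≤ groups.length
instance (combi : List Int) (groups : List Int) (length : Int) : Decidable (Pre_combi_to_springs combi groups length) := by unfold Pre_combi_to_springs; infer_instance
def pvWitness_combi_to_springs : List Int × List Int × Int := ([1, 4], [1, 2], 8)

def Spec_combi_to_springs (combi : List Int) (groups : List Int) (length : Int) (out : List String) : Prop := out = combi_to_springs_alt combi groups length
instance (combi : List Int) (groups : List Int) (length : Int) (out : List String) : Decidable (Spec_combi_to_springs combi groups length out) := by unfold Spec_combi_to_springs; infer_instance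

-- ===== CLAIM (what is proved, stated in full; the proofs are below) =====
def Claim_equal_combi_to_springs : Prop := ∀ (combi : List Int) (groups : List Int) (length : Int), Dom_combi_to_springs combi groups length → Pre_combi_to_springs combi groups length → Spec_combi_to_springs combi groups length (combi_to_springs combi groups length)

-- ===== LEMMAS AND PROOFS =====

-- the common segment decomposition both programs produce: dots up to each offset, then hashes
def pvSegs : List (Int × Int) → Int → List String
  | [], _ => []
  | (c, g) :: rest, prev =>
      List.replicate (c - prev).toNat "." ++ List.replicate g.toNat "#" ++ pvSegs rest c

-- the runs Source B's pass 1 produces, written recursively for the proof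
def pvRunsOf : List (Int × Int) → Int → Int → List (Int × Int)
  | [], _, _ => []
  | (c, g) :: rest, pos, prev =>
      (pos + max (c - prev) 0, max g 0) :: pvRunsOf rest (pos + max (c - prev) 0 + max g 0) c

-- pvAppendLoop appends exactly k.toNat copies of x.
theorem pvAppendLoop_eq (k : Int) (x : String) (s : List String) :
    pvAppendLoop k x s = s ++ List.replicate k.toNat x := by
  unfold pvAppendLoop
  rw [PySem.List.foldl_append_singleton_eq_map (f := fun (_ : Int) => x)]
  simp [List.map_const', PySem.List.length_pyRange_one]

-- pvSeg from the zip-with-shifted-prevs form equals pvSegs with the prev threaded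
def pvSeg (cpg : (Int × Int) × Int) : List String :=
  List.replicate (cpg.1.1 - cpg.1.2).toNat "." ++ List.replicate cpg.2.toNat "#"

theorem pvSegs_eq_flatMap : ∀ (cs gs : List Int) (prev : Int),
    ((cs.zip (prev :: cs.dropLast)).zip gs).flatMap pvSeg = pvSegs (cs.zip gs) prev := by
  intro cs
  induction cs with
  | nil => intro gs prev; simp [pvSegs]
  | cons c cs' ih =>
    intro gs prev
    cases gs with
    | nil => simp [pvSegs]
    | cons g gs' =>
      cases cs' with
      | nil => simp [pvSegs, pvSeg]
      | cons c2 rest =>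
        simp only [List.dropLast_cons_of_ne_nil (by simp : (c2 :: rest : List Int) ≠ []),
          List.zip_cons_cons, List.flatMap_cons, pvSegs, pvSeg]
        have h2 := ih gs' c
        simp only [List.zip_cons_cons] at h2
        rw [h2]

-- Loop invariant: A's main loop from index i equals s ++ flattened segments from i on.
theorem loopA_inv (combi groups : List Int) (h : combi.length ≤ groups.length) :
    ∀ (k i : Nat) (s : List String), i + k = combi.length →
      (PySem.List.pyRange (i : Int) (combi.length : Int) 1).foldl
        (fun springs j =>
          let springs := pvAppendLoop
            (PySem.List.pyGetD combi j 0 -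
              (if j == 0 then 0 else PySem.List.pyGetD combi (j - 1) 0)) "." springs
          pvAppendLoop (PySem.List.pyGetD groups j 0) "#" springs) s
      = s ++ (((combi.zip (0 :: combi.dropLast)).zip groups).drop i).flatMap pvSeg := by
  intro k
  induction k with
  | zero =>
    intro i s hi
    have hZ : ((combi.zip (0 :: combi.dropLast)).zip groups).length ≤ i := by
      simp [List.length_zip, List.length_dropLast]; omega
    rw [PySem.List.pyRange_one_eq_nil (by omega)]
    simp [List.drop_eq_nil_of_le hZ]
  | succ k ih =>
    intro i s hi
    have hin : i < combi.length := by omega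
    have hZlen : ((combi.zip (0 :: combi.dropLast)).zip groups).length = combi.length := by
      simp [List.length_zip, List.length_dropLast]; omega
    have hiZ : i < ((combi.zip (0 :: combi.dropLast)).zip groups).length := by omega
    have hprevlen : i < (0 :: combi.dropLast).length := by
      simp [List.length_dropLast]; omega
    rw [PySem.List.pyRange_one_cons (by exact_mod_cast hin)]
    simp only [List.foldl_cons]
    have hget : ((combi.zip (0 :: combi.dropLast)).zip groups)[i]'hiZ
        = ((combi[i], (0 :: combi.dropLast)[i]'hprevlen), groups[i]'(by omega)) := by
      simp [List.getElem_zip]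
    have hprev : (if (i : Int) == 0 then (0:Int) else PySem.List.pyGetD combi ((i : Int) - 1) 0)
        = (0 :: combi.dropLast)[i]'hprevlen := by
      by_cases h0 : i = 0
      · subst h0; simp
      · have hbne : ((i : Int) == 0) = false := by simp; omega
        have hcast : ((i : Int) - 1) = ((i - 1 : Nat) : Int) := by omega
        rw [hbne, hcast, if_neg (by simp)]
        rw [PySem.List.pyGetD_natCast]
        have hlt : i - 1 < combi.length := by omega
        rw [List.getD_eq_getElem _ _ hlt]
        rcases i with _ | j
        · omega
        · simp only [List.getElem_cons_succ]
          rw [List.getElem_dropLast]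
          simp
    have hc : PySem.List.pyGetD combi (i : Int) 0 = combi[i] := by
      rw [PySem.List.pyGetD_natCast, List.getD_eq_getElem _ _ hin]
    have hg : PySem.List.pyGetD groups (i : Int) 0 = groups[i]'(by omega) := by
      rw [PySem.List.pyGetD_natCast, List.getD_eq_getElem _ _ (by omega)]
    have hstep :
        pvAppendLoop (PySem.List.pyGetD groups (i : Int) 0) "#"
          (pvAppendLoop
            (PySem.List.pyGetD combi (i : Int) 0 -
              (if (i : Int) == 0 then 0 else PySem.List.pyGetD combi ((i : Int) - 1) 0)) "." s)
        = s ++ pvSeg (((combi.zip (0 :: combi.dropLast)).zip groups)[i]'hiZ) := by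
      simp only [pvAppendLoop_eq, hget, hprev, hc, hg, pvSeg, List.append_assoc]
    rw [hstep]
    have hcast1 : ((i : Int) + 1) = ((i + 1 : Nat) : Int) := by push_cast; ring
    rw [hcast1, ih (i + 1) _ (by omega)]
    conv_rhs => rw [List.drop_eq_getElem_cons hiZ]
    simp [List.flatMap_cons, List.append_assoc]

-- B's pass 1 produces exactly pvRunsOf and the segment length as final position.
theorem pvPass1_eq : ∀ (ps : List (Int × Int)) (runs₀ : List (Int × Int)) (pos prev : Int),
    ∃ p, ps.foldl pvPass1 (runs₀, pos, prev)
      = (runs₀ ++ pvRunsOf ps pos prev, pos + ((pvSegs ps prev).length : Int), p) := by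
  intro ps
  induction ps with
  | nil => intro runs₀ pos prev; exact ⟨prev, by simp [pvRunsOf, pvSegs]⟩
  | cons cg rest ih =>
    intro runs₀ pos prev
    obtain ⟨c, g⟩ := cg
    obtain ⟨p, hp⟩ := ih (runs₀ ++ [(pos + max (c - prev) 0, max g 0)])
      (pos + max (c - prev) 0 + max g 0) c
    refine ⟨p, ?_⟩
    simp only [List.foldl_cons, pvPass1, pvRunsOf, pvSegs, hp, Prod.mk.injEq]
    refine ⟨by simp, ?_, trivial⟩
    simp only [List.length_append, List.length_replicate]
    push_cast
    omega

-- Marking the runs onto a dotted background of sufficient size yields the segments.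
theorem pvMark_runs : ∀ (ps : List (Int × Int)) (pos prev : Int) (X : List String) (k : Nat),
    X.length = pos.toNat → 0 ≤ pos → (pvSegs ps prev).length ≤ k →
    (pvRunsOf ps pos prev).foldl pvMark (X ++ List.replicate k ".")
      = X ++ pvSegs ps prev ++ List.replicate (k - (pvSegs ps prev).length) "." := by
  intro ps
  induction ps with
  | nil => intro pos prev X k _ _ _; simp [pvRunsOf, pvSegs]
  | cons cg rest ih =>
    intro pos prev X k hX hpos hk
    obtain ⟨c, g⟩ := cg
    set d := (c - prev).toNat with hd
    set h := g.toNat with hh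
    have hmaxc : max (c - prev) 0 = (d : Int) := by omega
    have hmaxg : max g 0 = (h : Int) := by omega
    have hlen : (pvSegs ((c, g) :: rest) prev).length = d + h + (pvSegs rest c).length := by
      simp [pvSegs]; omega
    have hdk : d + h + (pvSegs rest c).length ≤ k := by omega
    simp only [pvRunsOf, List.foldl_cons, hmaxc, hmaxg]
    have hsN : (pos + (d : Int)).toNat = X.length + d := by omega
    have hmark : pvMark (X ++ List.replicate k ".") (pos + (d : Int), (h : Int))
        = (X ++ List.replicate d "." ++ List.replicate h "#")
          ++ List.replicate (k - d - h) "." := by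
      unfold pvMark
      simp only [hsN, Int.toNat_natCast]
      rw [List.take_append, List.drop_append]
      rw [List.take_of_length_le (by omega), List.drop_eq_nil_of_le (by omega)]
      have e1 : min d k = d := by omega
      have e2 : k - (X.length + d + h - X.length) = k - d - h := by omega
      simp [List.take_replicate, List.drop_replicate, e1, e2, List.append_assoc]
    rw [hmark]
    have hX' : (X ++ List.replicate d "." ++ List.replicate h "#").length
        = (pos + (d : Int) + (h : Int)).toNat := by
      simp [List.length_append]; omega
    rw [ih (pos + (d : Int) + (h : Int)) c _ _ hX' (by omega) (by omega)]
    have hcnt : k - d - h - (pvSegs rest c).length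
        = k - (d + (h + (pvSegs rest c).length)) := by omega
    simp [pvSegs, List.append_assoc, hcnt]
    rw [← hd, ← hh]

-- ===== VERDICT (by name: the statement is the Claim_ definition above) =====
theorem combi_to_springs_spec : Claim_equal_combi_to_springs := by
  intro combi groups length _ hpre
  unfold Spec_combi_to_springs combi_to_springs combi_to_springs_alt
  have h0 := loopA_inv combi groups hpre combi.length 0 [] (by omega)
  simp only [Nat.cast_zero] at h0
  rw [h0, pvAppendLoop_eq]
  simp only [List.drop_zero, List.nil_append]
  rw [pvSegs_eq_flatMap]
  obtain ⟨p, hp⟩ := pvPass1_eq (combi.zip groups) [] 0 0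
  rw [hp]
  simp only [List.nil_append, zero_add]
  set L := (pvSegs (combi.zip groups) 0).length with hL
  have hkey : (max ((L : Int)) length).toNat ≥ L := by omega
  rw [← List.nil_append (List.replicate (max ((L : Int)) length).toNat ".")]
  rw [pvMark_runs (combi.zip groups) 0 0 [] ((max ((L : Int)) length).toNat) (by simp) (by omega) hkey]
  simp only [List.nil_append, List.append_cancel_left_eq]
  congr 1
  omega
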